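-- pv_equiv track=rewrite | github.com/tjennings/poker_solver | core/hands.py | _index_to_hand
-- ===== SOURCE A (Python) =====
-- RANKS = "AKQJT98765432"
--
-- def _index_to_hand(combo_idx: int, suffix: str) -> str:
--     """Convert a suited/offsuit combo index (0-77) to hand string."""
--     # Find which high rank this belongs to
--     count = 0
--     for r1_idx in range(13):
--         combos_for_rank = 12 - r1_idx
--         if count + combos_for_rank > combo_idx:
--             # This is the rank
--             r2_offset = combo_idx - count
--             r2_idx = r1_idx + 1 + r2_offset
--             return RANKS[r1_idx] + RANKS[r2_idx] + suffix
--         count += combos_for_rank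
--     raise ValueError(f"Invalid combo index: {combo_idx}")
-- ===== SOURCE B (Python) =====
-- RANKS = "AKQJT98765432"
--
-- # All 78 two-rank hand prefixes, enumerated once in combo-index order.
-- _HANDS = [RANKS[i] + RANKS[j] for i in range(13) for j in range(i + 1, 13)]
--
--
-- def _index_to_hand(combo_idx: int, suffix: str) -> str:
--     """Convert a suited/offsuit combo index (0-77) to hand string."""
--     if not 0 <= combo_idx < 78:
--         raise ValueError(f"Invalid combo index: {combo_idx}")
--     return _HANDS[combo_idx] + suffix
-- ===== Notes on version B (the rewrite author's own statement) =====
-- stated objective: simpler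
-- what changed: B replaces A's per-call accumulator scan over the 13 high ranks by a precomputed flat table of the 78 hand prefixes, so a call is a bounds check plus one direct list index.
-- outside the precondition, e.g. on _index_to_hand(-5, 's'): A returns 'A5s', B raises ValueError; on _index_to_hand(-1, 's'): A returns 'AAs', B raises ValueError
import Mathlib
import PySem

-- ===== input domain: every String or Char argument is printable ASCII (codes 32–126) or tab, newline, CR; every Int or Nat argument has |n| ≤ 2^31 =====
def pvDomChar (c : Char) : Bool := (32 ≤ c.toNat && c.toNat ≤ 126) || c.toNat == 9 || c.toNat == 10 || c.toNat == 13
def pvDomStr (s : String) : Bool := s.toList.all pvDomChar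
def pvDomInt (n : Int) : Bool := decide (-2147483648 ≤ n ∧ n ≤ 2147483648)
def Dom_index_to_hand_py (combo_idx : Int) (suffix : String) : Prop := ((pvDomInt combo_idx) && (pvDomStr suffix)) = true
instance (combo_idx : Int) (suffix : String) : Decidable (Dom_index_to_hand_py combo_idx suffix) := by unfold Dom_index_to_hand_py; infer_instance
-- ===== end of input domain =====

-- B replaces A's per-call accumulator scan by a precomputed table of the 78 hand prefixes (objective: simpler).


def RANKS : String := "AKQJT98765432"

-- ===== PORT A =====
-- the for-loop over range(13) with the running `count`; none = an exception (excluded by Pre_)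
def indexToHandLoop (combo_idx : Int) (suffix : String) : List Int → Int → Option String
  | [], _ => none  -- loop exhausted: raise ValueError
  | r1_idx :: rest, count =>
      let combos_for_rank := 12 - r1_idx
      if count + combos_for_rank > combo_idx then
        let r2_offset := combo_idx - count
        let r2_idx := r1_idx + 1 + r2_offset
        match PySem.Str.pyGet? RANKS r1_idx, PySem.Str.pyGet? RANKS r2_idx with
        | some c1, some c2 => some (String.ofList [c1] ++ String.ofList [c2] ++ suffix)
        | _, _ => none  -- IndexError
      else indexToHandLoop combo_idx suffix rest (count + combos_for_rank)

def index_to_hand_py (combo_idx : Int) (suffix : String) : String :=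
  (indexToHandLoop combo_idx suffix (PySem.List.pyRange 0 13 1) 0).getD ""

-- ===== PORT B =====
-- _HANDS = [RANKS[i] + RANKS[j] for i in range(13) for j in range(i + 1, 13)]
def handsTable : List String :=
  (PySem.List.pyRange 0 13 1).flatMap (fun i =>
    (PySem.List.pyRange (i + 1) 13 1).map (fun j =>
      match PySem.Str.pyGet? RANKS i, PySem.Str.pyGet? RANKS j with
      | some c1, some c2 => String.ofList [c1] ++ String.ofList [c2]
      | _, _ => ""))  -- unreachable: i, j are in range

def index_to_hand_py_alt (combo_idx : Int) (suffix : String) : String :=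
  if ¬ (0 ≤ combo_idx ∧ combo_idx < 78) then ""  -- raise ValueError (excluded by Pre_)
  else ((PySem.List.pyGet? handsTable combo_idx).getD "") ++ suffix

-- ===== PRECONDITION & SPEC =====
-- Pre_ excludes combo_idx ≥ 78 and combo_idx ≤ -15, where A raises (ValueError / IndexError), and
-- -14 ≤ combo_idx ≤ -1, where A's returned value is an accident of Python's negative-index
-- wraparound and B's own validation naturally raises ValueError.
def Pre_index_to_hand_py (combo_idx : Int) (suffix : String) : Prop :=
  0 ≤ combo_idx ∧ combo_idx < 78
instance (combo_idx : Int) (suffix : String) : Decidable (Pre_index_to_hand_py combo_idx suffix) := by unfold Pre_index_to_hand_py; infer_instance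
def pvWitness_index_to_hand_py : Int × String := (13, "s")

def Spec_index_to_hand_py (combo_idx : Int) (suffix : String) (out : String) : Prop := out = index_to_hand_py_alt combo_idx suffix
instance (combo_idx : Int) (suffix : String) (out : String) : Decidable (Spec_index_to_hand_py combo_idx suffix out) := by unfold Spec_index_to_hand_py; infer_instance

-- ===== CLAIM (what is proved, stated in full; the proofs are below) =====
def Claim_equal_index_to_hand_py : Prop := ∀ (combo_idx : Int) (suffix : String), Dom_index_to_hand_py combo_idx suffix → Pre_index_to_hand_py combo_idx suffix → Spec_index_to_hand_py combo_idx suffix (index_to_hand_py combo_idx suffix)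

-- ===== LEMMAS AND PROOFS =====

-- ===== VERDICT (by name: the statement is the Claim_ definition above) =====
theorem index_to_hand_py_spec : Claim_equal_index_to_hand_py := by
  intro combo_idx suffix _ hpre
  unfold Spec_index_to_hand_py
  obtain ⟨h0, h78⟩ := hpre
  interval_cases combo_idx <;> rfl
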